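-- pv_equiv track=rewrite | github.com/kdrzazga/python-tutorial | olimpiada/oij19/lic.py | find_even_digit_numbers
-- ===== SOURCE A (Python) =====
-- def is_number_even_digit(number: int):
--     number_str = str(number)
--
--     for i in range(0, len(number_str)):
--         digit = int(number_str[i])
--         if digit % 2 != 0:
--             return False
--     return True
--
-- def find_even_digit_numbers(amount: int):
--     n = 2
--    # even_digit_numbers = []
--     even_digit_number = 0
--
--     while amount > 0:
--         if is_number_even_digit(n):
--             #even_digit_numbers.append(n)
--             even_digit_number = n
--             amount -= 1
--         n += 1
--     return even_digit_number
-- ===== SOURCE B (Python) =====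
-- def find_even_digit_numbers(amount: int):
--     # The positive integers whose decimal digits are all even, in increasing
--     # order, are exactly the base-5 numerals of 1, 2, 3, ... with each base-5
--     # digit d replaced by the decimal digit 2*d.  So the amount-th one is
--     # obtained directly from the base-5 representation of amount.
--     if amount <= 0:
--         return 0
--     return 10 * find_even_digit_numbers(amount // 5) + 2 * (amount % 5)
-- ===== Notes on version B (the rewrite author's own statement) =====
-- stated objective: faster
-- what changed: Instead of scanning every integer from 2 upward and testing each one's decimal digits, B computes the answer in closed form from the base-5 representation of amount (base-5 digit d becomes decimal digit 2d).
import Mathlib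
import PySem

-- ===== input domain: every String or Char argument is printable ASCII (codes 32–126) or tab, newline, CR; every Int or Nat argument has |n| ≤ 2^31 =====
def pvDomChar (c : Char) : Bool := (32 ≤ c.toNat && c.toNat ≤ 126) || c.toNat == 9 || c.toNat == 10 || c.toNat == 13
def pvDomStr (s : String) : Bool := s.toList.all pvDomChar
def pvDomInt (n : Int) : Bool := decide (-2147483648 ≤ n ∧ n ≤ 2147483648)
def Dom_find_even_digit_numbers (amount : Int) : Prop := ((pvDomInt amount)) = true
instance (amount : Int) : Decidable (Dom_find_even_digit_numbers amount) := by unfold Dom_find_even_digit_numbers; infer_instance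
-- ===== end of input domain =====

-- B replaces A's scan of every integer (testing each one's decimal digits) by the
-- closed form read off the base-5 representation of amount; measured faster (asymptotic).


-- ===== PORT A =====
-- helper is_number_even_digit: the for-loop over the characters of str(number)
-- becomes structural recursion over the character list.
def pvDigitsLoop : List Char → Bool
  | [] => true                                             -- fell through the loop: return True
  | c :: rest =>
      -- digit = int(number_str[i]); A only ever calls this on positive n, whose
      -- characters are all decimal digits, so int() never raises; getD 0 is unreachable.
      let digit : Int := (PySem.Int.ofChars? [c]).getD 0
      if PySem.Int.mod digit 2 ≠ 0 then false else pvDigitsLoop rest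

def is_number_even_digit (number : Int) : Bool :=
  pvDigitsLoop (PySem.Int.toChars number)

-- ---- termination infrastructure for A's while-loop (cited by decreasing_by below) ----
-- Bool predicate "all decimal digits of n are even", on the Nat.digits side.
def pvEDb (n : Nat) : Bool := (Nat.digits 10 n).all (fun d => d % 2 = 0)

-- The k-th all-even-digit number (base-5 digits of k, each doubled); its unboundedness
-- supplies the termination witness for the search loop.
def pvG : Nat → Nat
  | 0 => 0
  | n+1 => 10 * pvG ((n+1)/5) + 2 * ((n+1)%5)
decreasing_by exact Nat.div_lt_self (Nat.succ_pos n) (by omega)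

theorem pvG_succ (n : Nat) : pvG (n+1) = 10 * pvG ((n+1)/5) + 2 * ((n+1)%5) := by
  rw [pvG]

theorem pvG_zero : pvG 0 = 0 := by rw [pvG]

theorem pvG_one : pvG 1 = 2 := by rw [pvG_succ, pvG_zero]

theorem pvG_pos {k : Nat} (hk : 0 < k) : 0 < pvG k := by
  induction k using Nat.strong_induction_on with
  | _ k ih =>
    match k, hk with
    | n+1, _ =>
      rw [pvG_succ]
      rcases Nat.eq_zero_or_pos ((n+1) % 5) with h5 | h5
      · have hd : 0 < (n+1)/5 := by omega
        have := ih ((n+1)/5) (Nat.div_lt_self (Nat.succ_pos n) (by omega)) hd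
        omega
      · omega

theorem pvG_lt_succ (k : Nat) : pvG k < pvG (k+1) := by
  induction k using Nat.strong_induction_on with
  | _ k ih =>
    match k with
    | 0 => rw [pvG_zero, pvG_one]; omega
    | n+1 =>
      rw [pvG_succ, pvG_succ]
      rcases Nat.lt_or_ge ((n+1) % 5) 4 with h4 | h4
      · have hq : (n+2)/5 = (n+1)/5 := by omega
        have hr : (n+2)%5 = (n+1)%5 + 1 := by omega
        rw [hq, hr]; omega
      · have hq : (n+2)/5 = (n+1)/5 + 1 := by omega
        have hr : (n+2)%5 = 0 := by omega
        have := ih ((n+1)/5) (Nat.div_lt_self (Nat.succ_pos n) (by omega))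
        rw [hq, hr]
        have h5 : (n+1) % 5 < 5 := Nat.mod_lt _ (by omega)
        omega

theorem pvG_mono : StrictMono pvG := strictMono_nat_of_lt_succ pvG_lt_succ

theorem pvG_even (k : Nat) : pvEDb (pvG k) = true := by
  induction k using Nat.strong_induction_on with
  | _ k ih =>
    match k with
    | 0 => rw [pvG_zero]; decide
    | n+1 =>
      have hpos : 0 < pvG (n+1) := pvG_pos (Nat.succ_pos n)
      have hr : (n+1) % 5 < 5 := Nat.mod_lt _ (by omega)
      have hmod : pvG (n+1) % 10 = 2 * ((n+1)%5) := by rw [pvG_succ]; omega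
      have hdiv : pvG (n+1) / 10 = pvG ((n+1)/5) := by rw [pvG_succ]; omega
      have hd := Nat.digits_def' (b := 10) (by omega) hpos
      have ih' := ih ((n+1)/5) (Nat.div_lt_self (Nat.succ_pos n) (by omega))
      simp only [pvEDb] at ih' ⊢
      rw [hd, List.all_cons, hmod, hdiv, ih']
      simp only [Bool.and_true, decide_eq_true_eq]
      omega

-- bridge: the string test of the port equals the Nat.digits predicate
theorem pvToDigitsCore_eq : ∀ (f n : Nat) (ds : List Char), n ≠ 0 → n < f →
    Nat.toDigitsCore 10 f n ds = ((Nat.digits 10 n).map Nat.digitChar).reverse ++ ds := by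
  intro f
  induction f with
  | zero => intro n ds h hf; omega
  | succ f ih =>
    intro n ds h hf
    rw [Nat.toDigitsCore]
    rcases Nat.eq_zero_or_pos (n / 10) with h10 | h10
    · simp only [h10, if_pos]
      rw [Nat.digits_def' (b := 10) (by omega) (by omega), h10]
      simp
    · rw [if_neg (by omega)]
      rw [ih (n / 10) _ (by omega) (by have := Nat.div_lt_self (by omega : 0 < n) (by omega : 1 < 10); omega)]
      rw [Nat.digits_def' (b := 10) (n := n) (by omega) (by omega),
          Nat.digits_def' (b := 10) (n := n / 10) (by omega) h10]
      simp

theorem pvOfChars_digitChar (d : Nat) (hd : d < 10) :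
    PySem.Int.ofChars? [Nat.digitChar d] = some (d : Int) := by
  interval_cases d <;> decide

theorem pvLoop_map (l : List Nat) (h : ∀ d ∈ l, d < 10) :
    pvDigitsLoop (l.map Nat.digitChar) = l.all (fun d => d % 2 = 0) := by
  induction l with
  | nil => rfl
  | cons d rest ih =>
    have hd : d < 10 := h d (by simp)
    simp only [List.map_cons, pvDigitsLoop, pvOfChars_digitChar d hd, Option.getD_some]
    have hmod : PySem.Int.mod (d : Int) 2 = ((d % 2 : Nat) : Int) := by
      rw [PySem.Int.mod_eq_emod_of_pos (by omega)]; omega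
    rw [hmod]
    by_cases h2 : d % 2 = 0
    · rw [if_neg (by simp [h2])]
      simp [h2, ih (fun x hx => h x (by simp [hx]))]
    · rw [if_pos (by omega)]
      simp [h2]

theorem pvEven_eq (n : Nat) : is_number_even_digit (n : Int) = pvEDb n := by
  have htc : PySem.Int.toChars (n : Int) = Nat.toDigits 10 n := by
    simp [PySem.Int.toChars]
  rcases Nat.eq_zero_or_pos n with h0 | h0
  · subst h0; decide
  · rw [is_number_even_digit, htc, Nat.toDigits,
        pvToDigitsCore_eq (n+1) n [] (by omega) (by omega)]
    have hlt : ∀ d ∈ (Nat.digits 10 n).reverse, d < 10 := by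
      intro d hd
      exact Nat.digits_lt_base (by omega) (List.mem_reverse.mp hd)
    calc pvDigitsLoop (((Nat.digits 10 n).map Nat.digitChar).reverse ++ [])
        = pvDigitsLoop (((Nat.digits 10 n).reverse).map Nat.digitChar) := by
          rw [List.append_nil, List.map_reverse]
      _ = ((Nat.digits 10 n).reverse).all (fun d => d % 2 = 0) := pvLoop_map _ hlt
      _ = pvEDb n := by rw [pvEDb, List.all_reverse]

theorem pvExistsEven (n : Nat) : ∃ m, n ≤ m ∧ is_number_even_digit (m : Int) = true := by
  refine ⟨pvG n, pvG_mono.le_apply, ?_⟩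
  rw [pvEven_eq]; exact pvG_even n

def pvNextEven (n : Nat) : Nat := Nat.find (pvExistsEven n)

theorem pvNextEven_ge (n : Nat) : n ≤ pvNextEven n := (Nat.find_spec (pvExistsEven n)).1

theorem pvNextEven_even (n : Nat) : is_number_even_digit ((pvNextEven n : Nat) : Int) = true :=
  (Nat.find_spec (pvExistsEven n)).2

theorem pvNextEven_min {n m : Nat} (hm : n ≤ m) (he : is_number_even_digit (m : Int) = true) :
    pvNextEven n ≤ m := Nat.find_min' (pvExistsEven n) ⟨hm, he⟩

theorem pvNextEven_lt {n : Nat} (h : is_number_even_digit (n : Int) = false) :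
    n < pvNextEven n := by
  have hge := pvNextEven_ge n
  rcases Nat.eq_or_lt_of_le hge with heq | hlt
  · exfalso; have := pvNextEven_even n; rw [← heq] at this; rw [this] at h; cases h
  · exact hlt

theorem pvNextEven_succ {n : Nat} (h : is_number_even_digit (n : Int) = false) :
    pvNextEven (n+1) = pvNextEven n := by
  have h1 : pvNextEven n ≤ pvNextEven (n+1) :=
    pvNextEven_min (le_trans (by omega) (pvNextEven_ge (n+1))) (pvNextEven_even (n+1))
  have h2 : pvNextEven (n+1) ≤ pvNextEven n := by
    apply pvNextEven_min _ (pvNextEven_even n)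
    have := pvNextEven_lt h
    omega
  omega

-- the while-loop of find_even_digit_numbers: state (amount, n, even_digit_number).
-- n only ever moves upward from 2, so it is carried as a Nat.
def pvGoA (amount : Int) (n : Nat) (last : Int) : Int :=
  if amount > 0 then
    if is_number_even_digit (n : Int) then pvGoA (amount - 1) (n+1) ((n : Nat) : Int)
    else pvGoA amount (n+1) last
  else last
termination_by (amount.toNat, pvNextEven n - n)
decreasing_by
  · exact Prod.Lex.left _ _ (by omega)
  · apply Prod.Lex.right
    have h : is_number_even_digit ((n : Nat) : Int) = false := by
      simp only [eq_false_of_ne_true (by assumption)]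
    have h1 := pvNextEven_succ h
    have h2 := pvNextEven_lt h
    omega

def find_even_digit_numbers (amount : Int) : Int :=
  pvGoA amount 2 0

-- ===== PORT B =====
def find_even_digit_numbers_alt (amount : Int) : Int :=
  if amount ≤ 0 then 0
  else 10 * find_even_digit_numbers_alt (PySem.Int.floordiv amount 5)
       + 2 * PySem.Int.mod amount 5
termination_by amount.toNat
decreasing_by
  have := PySem.Int.floordiv_eq_ediv_of_pos (a := amount) (b := 5) (by omega)
  omega

-- ===== PRECONDITION & SPEC =====
def Spec_find_even_digit_numbers (amount : Int) (out : Int) : Prop := out = find_even_digit_numbers_alt amount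
instance (amount : Int) (out : Int) : Decidable (Spec_find_even_digit_numbers amount out) := by unfold Spec_find_even_digit_numbers; infer_instance

-- ===== CLAIM (what is proved, stated in full; the proofs are below) =====
def Claim_equal_find_even_digit_numbers : Prop := ∀ (amount : Int), Dom_find_even_digit_numbers amount → Spec_find_even_digit_numbers amount (find_even_digit_numbers amount)

-- ===== LEMMAS AND PROOFS =====

theorem pvNextEven_self {n : Nat} (h : is_number_even_digit (n : Int) = true) :
    pvNextEven n = n :=
  Nat.le_antisymm (pvNextEven_min le_rfl h) (pvNextEven_ge n)

theorem pvG_small (r : Nat) (hr : r < 5) : pvG r = 2 * r := by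
  match r, hr with
  | 0, _ => rw [pvG_zero]
  | n+1, h =>
    rw [pvG_succ]
    have h5 : (n+1)/5 = 0 := by omega
    have h6 : (n+1)%5 = n+1 := by omega
    rw [h5, h6, pvG_zero]
    omega

-- B's port computes pvG on the Nat side
theorem pvAlt_eq (a : Nat) : find_even_digit_numbers_alt (a : Int) = ((pvG a : Nat) : Int) := by
  induction a using Nat.strong_induction_on with
  | _ a ih =>
    match a with
    | 0 => rw [find_even_digit_numbers_alt]; simp [pvG]
    | n+1 =>
      rw [find_even_digit_numbers_alt]
      have hpos : ¬ ((n+1 : Nat) : Int) ≤ 0 := by omega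
      rw [if_neg hpos]
      have hfd : PySem.Int.floordiv ((n+1 : Nat) : Int) 5 = (((n+1)/5 : Nat) : Int) := by
        rw [PySem.Int.floordiv_eq_ediv_of_pos (by omega)]; omega
      have hmd : PySem.Int.mod ((n+1 : Nat) : Int) 5 = (((n+1)%5 : Nat) : Int) := by
        rw [PySem.Int.mod_eq_emod_of_pos (by omega)]; omega
      rw [hfd, hmd, ih ((n+1)/5) (Nat.div_lt_self (Nat.succ_pos n) (by omega)), pvG_succ]
      push_cast; ring

-- every positive all-even-digit number is some pvG k
theorem pvG_surj (m : Nat) (hm : 0 < m) (he : pvEDb m = true) : ∃ k, pvG k = m := by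
  induction m using Nat.strong_induction_on with
  | _ m ih =>
    have hd := Nat.digits_def' (b := 10) (by omega) hm
    have hall : (m % 10) % 2 = 0 ∧ pvEDb (m / 10) = true := by
      simp only [pvEDb] at he ⊢
      rw [hd, List.all_cons] at he
      simpa using he
    rcases Nat.eq_zero_or_pos (m / 10) with h10 | h10
    · -- single digit: m ∈ {2,4,6,8}, k = m/2
      refine ⟨m / 2, ?_⟩
      have hm10 : m < 10 := by omega
      have h2 := hall.1
      rw [pvG_small (m / 2) (by omega)]
      omega
    · rcases ih (m / 10) (Nat.div_lt_self hm (by omega)) h10 hall.2 with ⟨k', hk'⟩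
      have hk'pos : k' ≠ 0 := by
        intro h; rw [h] at hk'; simp [pvG] at hk'; omega
      refine ⟨5 * k' + (m % 10) / 2, ?_⟩
      have hlt : (m % 10) / 2 < 5 := by omega
      have h5 : (5 * k' + (m % 10) / 2) / 5 = k' := by omega
      have hm5 : (5 * k' + (m % 10) / 2) % 5 = (m % 10) / 2 := by omega
      have hne : 5 * k' + (m % 10) / 2 ≠ 0 := by omega
      obtain ⟨j, hj⟩ : ∃ j, 5 * k' + (m % 10) / 2 = j + 1 := ⟨5 * k' + (m % 10) / 2 - 1, by omega⟩
      rw [hj] at h5 hm5 ⊢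
      rw [pvG_succ, h5, hm5, hk']
      have := hall.1
      omega

-- the next all-even-digit number after pvG i is pvG (i+1)
theorem pvNextEven_g (i : Nat) : pvNextEven (pvG i + 1) = pvG (i + 1) := by
  apply Nat.le_antisymm
  · exact pvNextEven_min (by have := pvG_lt_succ i; omega)
      (by rw [pvEven_eq]; exact pvG_even (i+1))
  · -- minimality: any even-digit m with pvG i < m has m = pvG j, j ≥ i+1
    by_contra hlt
    push Not at hlt
    set m := pvNextEven (pvG i + 1) with hmdef
    have hge : pvG i + 1 ≤ m := pvNextEven_ge _
    have heven : pvEDb m = true := by rw [← pvEven_eq]; exact pvNextEven_even _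
    rcases pvG_surj m (by omega) heven with ⟨j, hj⟩
    have hij : i < j := by
      by_contra hji
      push Not at hji
      have := pvG_mono.le_iff_le.mpr hji
      omega
    have : pvG (i+1) ≤ pvG j := pvG_mono.le_iff_le.mpr (by omega)
    omega

-- one pass of the while loop: from n it advances to just past the next even-digit number
theorem pvStep (n : Nat) (amount last : Int) (ha : 0 < amount) :
    pvGoA amount n last = pvGoA (amount - 1) (pvNextEven n + 1) ((pvNextEven n : Nat) : Int) := by
  generalize hk : pvNextEven n - n = k
  induction k generalizing n with
  | zero =>
    have hge := pvNextEven_ge n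
    have heq : pvNextEven n = n := by omega
    have heven : is_number_even_digit (n : Int) = true := by rw [← heq]; exact pvNextEven_even n
    rw [pvGoA, if_pos ha, if_pos heven, heq]
  | succ k ih =>
    have hne : is_number_even_digit (n : Int) = false := by
      cases h : is_number_even_digit (n : Int)
      · rfl
      · exfalso; have := pvNextEven_self h; omega
    rw [pvGoA, if_pos ha, if_neg (by simp [hne])]
    have hsucc := pvNextEven_succ hne
    rw [ih (n+1) (by omega), hsucc]

-- the loop invariant: after landing on pvG i, k more iterations yield pvG (i+k)
theorem pvMain (k : Nat) : ∀ i : Nat,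
    pvGoA (k : Int) (pvG i + 1) ((pvG i : Nat) : Int) = ((pvG (i + k) : Nat) : Int) := by
  induction k with
  | zero => intro i; rw [pvGoA]; simp
  | succ k ih =>
    intro i
    have hpos : (0 : Int) < ((k+1 : Nat) : Int) := by omega
    rw [pvStep _ _ _ hpos, pvNextEven_g]
    have hk : ((k+1 : Nat) : Int) - 1 = (k : Int) := by omega
    rw [hk, ih (i+1), show i + 1 + k = i + (k+1) from by omega]

-- ===== VERDICT (by name: the statement is the Claim_ definition above) =====
theorem find_even_digit_numbers_spec : Claim_equal_find_even_digit_numbers := by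
  unfold Claim_equal_find_even_digit_numbers
  intro amount _
  unfold Spec_find_even_digit_numbers find_even_digit_numbers
  by_cases hle : amount ≤ 0
  · rw [pvGoA, if_neg (by omega), find_even_digit_numbers_alt, if_pos hle]
  · have hpos : (0 : Int) < amount := by omega
    obtain ⟨a, ha⟩ : ∃ a : Nat, amount = (a : Int) := ⟨amount.toNat, by omega⟩
    subst ha
    have ha1 : 1 ≤ a := by omega
    rw [pvStep 2 _ 0 hpos]
    have h2 : pvNextEven 2 = 2 := pvNextEven_self (by decide)
    rw [h2]
    have hcast : ((a : Nat) : Int) - 1 = ((a - 1 : Nat) : Int) := by omega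
    rw [hcast]
    have hmain := pvMain (a - 1) 1
    rw [pvG_one] at hmain
    rw [hmain, pvAlt_eq, show 1 + (a - 1) = a from by omega]
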